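-- pv_equiv track=rewrite | github.com/Aniket-art-hub/DSA_PRACTICE | Heap_priorityQueue.py/sort_narlysorted_array.py | nearlySorted
-- ===== SOURCE A (Python) =====
-- import heapq
--
-- def nearlySorted(a,n,k):
--     if n==0:
--         return
--     pq=[]
--     for i in range(n):
--         heapq.heappush(pq,(a[i]))
--     for i in range(n):
--         a[i] = heapq.heappop(pq)
--     return a
-- ===== SOURCE B (Python) =====
-- def nearlySorted(a, n, k):
--     if n == 0:
--         return
--     prefix = sorted(a[i] for i in range(n))
--     for i, v in enumerate(prefix):
--         a[i] = v
--     return a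
-- ===== Notes on version B (the rewrite author's own statement) =====
-- stated objective: simpler
-- what changed: A builds a binary min-heap of the first n elements with heapq and pops them one by one (heapsort); B sorts those n elements with one builtin sorted() call and writes them back, no heap at all.
import Mathlib
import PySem

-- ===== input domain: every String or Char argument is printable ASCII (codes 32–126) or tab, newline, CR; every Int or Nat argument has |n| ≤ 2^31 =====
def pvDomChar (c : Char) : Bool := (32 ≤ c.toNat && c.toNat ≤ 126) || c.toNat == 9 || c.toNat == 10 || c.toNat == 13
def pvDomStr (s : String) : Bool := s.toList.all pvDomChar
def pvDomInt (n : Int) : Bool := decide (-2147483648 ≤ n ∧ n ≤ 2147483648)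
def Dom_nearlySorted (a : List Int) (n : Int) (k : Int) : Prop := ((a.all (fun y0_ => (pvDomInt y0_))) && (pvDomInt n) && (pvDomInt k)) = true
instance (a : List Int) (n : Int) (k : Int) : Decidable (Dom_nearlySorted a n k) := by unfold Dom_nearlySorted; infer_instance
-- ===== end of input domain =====

-- B replaces A's heapq push-all/pop-all heapsort by one builtin sorted() call on the
-- first n elements written back in place (both Pythons mutate `a` the same way; the
-- equivalence proved here is about the return value).

-- ===== PORT A =====
-- heapq is ported by hand, step for step from CPython's heapq (_siftdown/_siftup);
-- exact wherever the heap is nonempty at each heappop, which holds inside nearlySorted.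

-- h[i] read with a default; exact: every read below is in range
def hget (h : List Int) (i : Nat) : Int := h.getD i 0

-- CPython _siftdown(heap, 0, pos): bubble newitem x up from pos (parentpos inlined)
def siftdown (h : List Int) (x : Int) (pos : Nat) : List Int :=
  if 0 < pos then
    if x < hget h ((pos - 1) / 2) then siftdown (h.set pos (hget h ((pos - 1) / 2))) x ((pos - 1) / 2)
    else h.set pos x
  else h.set pos x
termination_by pos
decreasing_by exact lt_of_le_of_lt (Nat.div_le_self _ _) (by omega)

-- CPython heappush
def heappush (h : List Int) (x : Int) : List Int := siftdown (h ++ [x]) x h.length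

-- the childpos selection of CPython _siftup (smaller of the two children)
def pickChild (h : List Int) (pos : Nat) : Nat :=
  if 2 * pos + 2 < h.length ∧ ¬ hget h (2 * pos + 1) < hget h (2 * pos + 2)
  then 2 * pos + 2 else 2 * pos + 1

-- descent phase of CPython _siftup(heap, 0): move the smaller child up until a leaf
def siftupDescend (h : List Int) (pos : Nat) : List Int × Nat :=
  if 2 * pos + 1 < h.length then
    siftupDescend (h.set pos (hget h (pickChild h pos))) (pickChild h pos)
  else (h, pos)
termination_by h.length - pos
decreasing_by simp only [List.length_set]; unfold pickChild; split <;> omega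

-- CPython heappop, locals inlined ((0, []) on the empty heap is unreachable here:
-- Python raises IndexError)
def heappop (h : List Int) : Int × List Int :=
  match h with
  | [] => (0, [])
  | _ :: _ =>
    if h.take (h.length - 1) = [] then (hget h (h.length - 1), [])
    else
      (hget (h.take (h.length - 1)) 0,
       siftdown (siftupDescend ((h.take (h.length - 1)).set 0 (hget h (h.length - 1))) 0).1
         (hget h (h.length - 1))
         (siftupDescend ((h.take (h.length - 1)).set 0 (hget h (h.length - 1))) 0).2)

def nearlySorted (a : List Int) (n : Int) (k : Int) : Option (List Int) :=
  if n = 0 then none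
  else
    -- a[i]: exact under Pre_ (indices 0 ≤ i < n ≤ len a); the inner foldl builds pq
    some ((PySem.List.pyRange 0 n 1).foldl
      (fun (st : List Int × List Int) i =>
        (PySem.List.pySetD st.1 i (heappop st.2).1, (heappop st.2).2))
      (a, (PySem.List.pyRange 0 n 1).foldl
            (fun pq i => heappush pq (PySem.List.pyGetD a i 0)) [])).1

-- ===== PORT B =====
def nearlySorted_alt (a : List Int) (n : Int) (k : Int) : Option (List Int) :=
  if n = 0 then none
  else
    -- sorted(a[i] for i in range(n)) written back at positions 0..; a[i] exact under Pre_
    some ((PySem.List.enumerate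
        (PySem.List.sorted ((PySem.List.pyRange 0 n 1).map (fun i => PySem.List.pyGetD a i 0))
          (fun x => x) false) 0).foldl
      (fun a1 (iv : Int × Int) => PySem.List.pySetD a1 iv.1 iv.2) a)

-- ===== PRECONDITION & SPEC =====
-- Pre_ excludes only the inputs where A raises IndexError (n larger than len(a)).
def Pre_nearlySorted (a : List Int) (n : Int) (k : Int) : Prop := n ≤ (a.length : Int)
instance (a : List Int) (n : Int) (k : Int) : Decidable (Pre_nearlySorted a n k) := by unfold Pre_nearlySorted; infer_instance
def pvWitness_nearlySorted : List Int × Int × Int := ([3, 1, 2], 3, 2)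

def Spec_nearlySorted (a : List Int) (n : Int) (k : Int) (out : Option (List Int)) : Prop := out = nearlySorted_alt a n k
instance (a : List Int) (n : Int) (k : Int) (out : Option (List Int)) : Decidable (Spec_nearlySorted a n k out) := by unfold Spec_nearlySorted; infer_instance

-- ===== CLAIM (what is proved, stated in full; the proofs are below) =====
def Claim_equal_nearlySorted : Prop := ∀ (a : List Int) (n : Int) (k : Int), Dom_nearlySorted a n k → Pre_nearlySorted a n k → Spec_nearlySorted a n k (nearlySorted a n k)

-- ===== LEMMAS AND PROOFS =====

-- reads and writes through hget / List.set
theorem hget_set_self (h : List Int) (i : Nat) (hi : i < h.length) (x : Int) :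
    hget (h.set i x) i = x := by
  simp [hget, List.getD_eq_getElem?_getD, hi]

theorem hget_set_ne (h : List Int) (i j : Nat) (hne : j ≠ i) (x : Int) :
    hget (h.set i x) j = hget h j := by
  simp [hget, List.getD_eq_getElem?_getD, List.getElem?_set_ne (Ne.symm hne)]

-- the binary-heap invariant of CPython's heapq
def isHeap (h : List Int) : Prop :=
  ∀ c, 0 < c → c < h.length → hget h ((c - 1) / 2) ≤ hget h c

theorem root_min (h : List Int) (hh : isHeap h) :
    ∀ i, i < h.length → hget h 0 ≤ hget h i := by
  intro i
  induction i using Nat.strong_induction_on with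
  | _ i IH =>
    intro hi
    rcases Nat.eq_zero_or_pos i with h0 | h0
    · subst h0; exact le_refl _
    · exact le_trans
        (IH ((i - 1) / 2) (lt_of_le_of_lt (Nat.div_le_self _ _) (by omega))
          (lt_trans (lt_of_le_of_lt (Nat.div_le_self _ _) (by omega)) hi))
        (hh i h0 hi)

theorem set_cons_perm : ∀ (t : List Int) (k : Nat), k < t.length → ∀ x : Int,
    (hget t k :: t.set k x).Perm (x :: t) := by
  intro t
  induction t with
  | nil => intro k hk; simp at hk
  | cons b s IH =>
    intro k hk x
    cases k with
    | zero => simpa [hget] using List.Perm.swap x b s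
    | succ m =>
      have hm : m < s.length := by simpa using hk
      have h1 : hget (b :: s) (m + 1) = hget s m := by simp [hget]
      rw [h1, List.set_cons_succ]
      exact ((List.Perm.swap b _ _).trans ((IH m hm x).cons b)).trans (List.Perm.swap x b s)

theorem set_set_perm : ∀ (h : List Int) (i j : Nat), i < h.length → j < h.length → i ≠ j →
    ∀ x : Int, ((h.set i (hget h j)).set j x).Perm (h.set i x) := by
  intro h
  induction h with
  | nil => intro i j hi; simp at hi
  | cons a t IH =>
    intro i j hi hj hne x
    cases i with
    | zero =>
      cases j with
      | zero => exact absurd rfl hne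
      | succ m =>
        have hm : m < t.length := by simpa using hj
        have h1 : hget (a :: t) (m + 1) = hget t m := by simp [hget]
        rw [h1]
        simpa using set_cons_perm t m hm x
    | succ l =>
      cases j with
      | zero =>
        have hl : l < t.length := by simpa using hi
        have h1 : hget (a :: t) 0 = a := by simp [hget]
        rw [h1, List.set_cons_succ, List.set_cons_zero, List.set_cons_succ]
        refine List.Perm.cons_inv (a := hget t l) ?_
        have e1 : (hget t l :: x :: t.set l a).Perm (a :: x :: t) :=
          (List.Perm.swap x _ _).trans (((set_cons_perm t l hl a).cons x).trans (List.Perm.swap a x t))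
        have e2 : (hget t l :: a :: t.set l x).Perm (a :: x :: t) :=
          (List.Perm.swap a _ _).trans ((set_cons_perm t l hl x).cons a)
        exact e1.trans e2.symm
      | succ m =>
        have hl : l < t.length := by simpa using hi
        have hm : m < t.length := by simpa using hj
        have h1 : hget (a :: t) (m + 1) = hget t m := by simp [hget]
        rw [h1, List.set_cons_succ, List.set_cons_succ, List.set_cons_succ]
        exact (IH l m hl hm (by omega) x).cons a

theorem siftdown_spec (x : Int) : ∀ (pos : Nat) (h : List Int), pos < h.length →
    (∀ c, 0 < c → c < h.length → c ≠ pos → (c - 1) / 2 ≠ pos → hget h ((c - 1) / 2) ≤ hget h c) →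
    (∀ c, 0 < c → c < h.length → (c - 1) / 2 = pos → x ≤ hget h c) →
    (∀ c, 0 < c → c < h.length → (c - 1) / 2 = pos → 0 < pos → hget h ((pos - 1) / 2) ≤ hget h c) →
    isHeap (siftdown h x pos) ∧ (siftdown h x pos).Perm (h.set pos x) := by
  intro pos
  induction pos using Nat.strong_induction_on with
  | _ pos IH =>
    intro h hlen P1 P2 P3
    rw [siftdown]
    by_cases hp : 0 < pos
    · rw [if_pos hp]
      have hparlt : (pos - 1) / 2 < pos := lt_of_le_of_lt (Nat.div_le_self _ _) (by omega)
      by_cases hlt : x < hget h ((pos - 1) / 2)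
      · rw [if_pos hlt]
        have hlen' : (pos - 1) / 2 < (h.set pos (hget h ((pos - 1) / 2))).length := by
          simp only [List.length_set]; omega
        have hP1' : ∀ c, 0 < c → c < (h.set pos (hget h ((pos - 1) / 2))).length →
            c ≠ (pos - 1) / 2 → (c - 1) / 2 ≠ (pos - 1) / 2 →
            hget (h.set pos (hget h ((pos - 1) / 2))) ((c - 1) / 2)
              ≤ hget (h.set pos (hget h ((pos - 1) / 2))) c := by
          intro c hc0 hclen hcne hcpar
          simp only [List.length_set] at hclen
          by_cases hcpos : c = pos
          · exact absurd (by rw [hcpos]) hcpar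
          by_cases hpp : (c - 1) / 2 = pos
          · rw [hpp, hget_set_self h pos hlen, hget_set_ne h pos c hcpos]
            exact P3 c hc0 hclen hpp hp
          · rw [hget_set_ne h pos _ hpp, hget_set_ne h pos c hcpos]
            exact P1 c hc0 hclen hcpos hpp
        have hP2' : ∀ c, 0 < c → c < (h.set pos (hget h ((pos - 1) / 2))).length →
            (c - 1) / 2 = (pos - 1) / 2 → x ≤ hget (h.set pos (hget h ((pos - 1) / 2))) c := by
          intro c hc0 hclen hcp
          simp only [List.length_set] at hclen
          by_cases hcpos : c = pos
          · rw [hcpos, hget_set_self h pos hlen]; exact le_of_lt hlt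
          · rw [hget_set_ne h pos c hcpos]
            exact le_trans (le_of_lt hlt) (hcp ▸ P1 c hc0 hclen hcpos (by omega))
        have hP3' : ∀ c, 0 < c → c < (h.set pos (hget h ((pos - 1) / 2))).length →
            (c - 1) / 2 = (pos - 1) / 2 → 0 < (pos - 1) / 2 →
            hget (h.set pos (hget h ((pos - 1) / 2))) (((pos - 1) / 2 - 1) / 2)
              ≤ hget (h.set pos (hget h ((pos - 1) / 2))) c := by
          intro c hc0 hclen hcp hppos
          simp only [List.length_set] at hclen
          have hgle : ((pos - 1) / 2 - 1) / 2 ≤ (pos - 1) / 2 - 1 := Nat.div_le_self _ _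
          have hgedge : hget h (((pos - 1) / 2 - 1) / 2) ≤ hget h ((pos - 1) / 2) :=
            P1 ((pos - 1) / 2) hppos (by omega) (by omega) (by omega)
          have hgne : ((pos - 1) / 2 - 1) / 2 ≠ pos := by omega
          rw [hget_set_ne h pos _ hgne]
          by_cases hcpos : c = pos
          · rw [hcpos, hget_set_self h pos hlen]; exact hgedge
          · rw [hget_set_ne h pos c hcpos]
            exact le_trans hgedge (hcp ▸ P1 c hc0 hclen hcpos (by omega))
        obtain ⟨H1, H2⟩ := IH ((pos - 1) / 2) hparlt _ hlen' hP1' hP2' hP3'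
        exact ⟨H1, H2.trans (set_set_perm h pos ((pos - 1) / 2) hlen (by omega) (by omega) x)⟩
      · rw [if_neg hlt]
        refine ⟨?_, List.Perm.refl _⟩
        intro c hc0 hclen
        rw [List.length_set] at hclen
        by_cases hcpos : c = pos
        · rw [hcpos, hget_set_ne h pos _ (by omega), hget_set_self h pos hlen]
          exact not_lt.mp hlt
        by_cases hpp : (c - 1) / 2 = pos
        · rw [hpp, hget_set_self h pos hlen, hget_set_ne h pos c hcpos]
          exact P2 c hc0 hclen hpp
        · rw [hget_set_ne h pos _ hpp, hget_set_ne h pos c hcpos]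
          exact P1 c hc0 hclen hcpos hpp
    · rw [if_neg hp]
      have hpos0 : pos = 0 := by omega
      subst hpos0
      refine ⟨?_, List.Perm.refl _⟩
      intro c hc0 hclen
      rw [List.length_set] at hclen
      by_cases hcp : (c - 1) / 2 = 0
      · rw [hcp, hget_set_self h 0 hlen, hget_set_ne h 0 c (by omega)]
        exact P2 c hc0 hclen hcp
      · rw [hget_set_ne h 0 _ hcp, hget_set_ne h 0 c (by omega)]
        exact P1 c hc0 hclen (by omega) hcp

theorem descend_spec : ∀ (fuel : Nat) (h : List Int) (pos : Nat), h.length - pos ≤ fuel →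
    pos < h.length →
    (∀ c, 0 < c → c < h.length → c ≠ pos → (c - 1) / 2 ≠ pos → hget h ((c - 1) / 2) ≤ hget h c) →
    (∀ c, 0 < c → c < h.length → (c - 1) / 2 = pos → 0 < pos → hget h ((pos - 1) / 2) ≤ hget h c) →
    (siftupDescend h pos).1.length = h.length ∧ (siftupDescend h pos).2 < h.length ∧
    ¬ (2 * (siftupDescend h pos).2 + 1 < h.length) ∧
    (∀ c, 0 < c → c < h.length → c ≠ (siftupDescend h pos).2 → (c - 1) / 2 ≠ (siftupDescend h pos).2 →
       hget (siftupDescend h pos).1 ((c - 1) / 2) ≤ hget (siftupDescend h pos).1 c) ∧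
    (∀ y : Int, ((siftupDescend h pos).1.set (siftupDescend h pos).2 y).Perm (h.set pos y)) := by
  intro fuel
  induction fuel with
  | zero => intro h pos hfuel hlen _ _; omega
  | succ fuel IH =>
    intro h pos hfuel hlen Qa Qb
    rw [siftupDescend]
    by_cases hc : 2 * pos + 1 < h.length
    · rw [if_pos hc]
      have hcc : pos < pickChild h pos ∧ pickChild h pos < h.length ∧
          (pickChild h pos - 1) / 2 = pos := by
        unfold pickChild; split
        · next hcond => exact ⟨by omega, hcond.1, by omega⟩
        · exact ⟨by omega, hc, by omega⟩
      have hmin : ∀ d, 0 < d → d < h.length → (d - 1) / 2 = pos →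
          hget h (pickChild h pos) ≤ hget h d := by
        intro d hd0 hdlen hdp
        have hd : d = 2 * pos + 1 ∨ d = 2 * pos + 2 := by omega
        unfold pickChild; split
        · next hcond =>
          rcases hd with hd | hd
          · rw [hd]; exact not_lt.mp hcond.2
          · rw [hd]
        · next hcond =>
          push Not at hcond
          rcases hd with hd | hd
          · rw [hd]
          · rw [hd]; exact le_of_lt (hcond (hd ▸ hdlen))
      have hlen' : (h.set pos (hget h (pickChild h pos))).length = h.length :=
        List.length_set ..
      have hQa' : ∀ c, 0 < c → c < (h.set pos (hget h (pickChild h pos))).length →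
          c ≠ pickChild h pos → (c - 1) / 2 ≠ pickChild h pos →
          hget (h.set pos (hget h (pickChild h pos))) ((c - 1) / 2)
            ≤ hget (h.set pos (hget h (pickChild h pos))) c := by
        intro d hd0 hdlen hdc hdpc
        rw [hlen'] at hdlen
        by_cases hdpos : d = pos
        · subst hdpos
          rw [hget_set_self h d hlen, hget_set_ne h d _ (by omega)]
          exact Qb (pickChild h d) (by omega) hcc.2.1 hcc.2.2 hd0
        by_cases hdp2 : (d - 1) / 2 = pos
        · rw [hdp2, hget_set_self h pos hlen, hget_set_ne h pos d hdpos]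
          exact hmin d hd0 hdlen hdp2
        · rw [hget_set_ne h pos _ hdp2, hget_set_ne h pos d hdpos]
          exact Qa d hd0 hdlen hdpos hdp2
      have hQb' : ∀ c, 0 < c → c < (h.set pos (hget h (pickChild h pos))).length →
          (c - 1) / 2 = pickChild h pos → 0 < pickChild h pos →
          hget (h.set pos (hget h (pickChild h pos))) ((pickChild h pos - 1) / 2)
            ≤ hget (h.set pos (hget h (pickChild h pos))) c := by
        intro d hd0 hdlen hdc _
        rw [hlen'] at hdlen
        rw [hcc.2.2, hget_set_self h pos hlen, hget_set_ne h pos d (by omega)]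
        exact hdc ▸ Qa d hd0 hdlen (by omega) (by omega)
      obtain ⟨L, Hp, Hleaf, HQa, HPerm⟩ :=
        IH (h.set pos (hget h (pickChild h pos))) (pickChild h pos)
          (by rw [hlen']; omega) (by rw [hlen']; exact hcc.2.1) hQa' hQb'
      rw [hlen'] at L Hp Hleaf HQa
      exact ⟨L, Hp, Hleaf, HQa, fun y => (HPerm y).trans
        (set_set_perm h pos (pickChild h pos) hlen hcc.2.1 (by omega) y)⟩
    · rw [if_neg hc]
      exact ⟨rfl, hlen, hc, Qa, fun y => List.Perm.refl _⟩

theorem hget_eq (h : List Int) (i : Nat) (hi : i < h.length) : hget h i = h[i] :=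
  List.getD_eq_getElem h 0 hi

theorem hget_append_left (h : List Int) (l : List Int) (i : Nat) (hi : i < h.length) :
    hget (h ++ l) i = hget h i := by
  rw [hget_eq _ i (by simp; omega), hget_eq h i hi, List.getElem_append_left hi]

theorem heappush_spec (h : List Int) (x : Int) (hh : isHeap h) :
    isHeap (heappush h x) ∧ (heappush h x).Perm (x :: h) := by
  unfold heappush
  have hlen : h.length < (h ++ [x]).length := by simp
  have hP1 : ∀ c, 0 < c → c < (h ++ [x]).length → c ≠ h.length → (c - 1) / 2 ≠ h.length →
      hget (h ++ [x]) ((c - 1) / 2) ≤ hget (h ++ [x]) c := by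
    intro c hc0 hclen hcne _
    simp only [List.length_append, List.length_singleton] at hclen
    have hc : c < h.length := by omega
    have hp : (c - 1) / 2 < h.length := by have := Nat.div_le_self (c - 1) 2; omega
    rw [hget_append_left h [x] c hc, hget_append_left h [x] _ hp]
    exact hh c hc0 hc
  have hP2 : ∀ c, 0 < c → c < (h ++ [x]).length → (c - 1) / 2 = h.length →
      x ≤ hget (h ++ [x]) c := by
    intro c hc0 hclen hcp
    simp only [List.length_append, List.length_singleton] at hclen
    omega
  have hP3 : ∀ c, 0 < c → c < (h ++ [x]).length → (c - 1) / 2 = h.length → 0 < h.length →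
      hget (h ++ [x]) ((h.length - 1) / 2) ≤ hget (h ++ [x]) c := by
    intro c hc0 hclen hcp _
    simp only [List.length_append, List.length_singleton] at hclen
    omega
  obtain ⟨H1, H2⟩ := siftdown_spec x h.length (h ++ [x]) hlen hP1 hP2 hP3
  refine ⟨H1, H2.trans ?_⟩
  have he : (h ++ [x]).set h.length x = h ++ [x] := by
    simp
  rw [he]
  exact List.perm_append_comm

theorem heappop_spec (h : List Int) (hh : isHeap h) (hne : h ≠ []) :
    (heappop h).1 = hget h 0 ∧ isHeap (heappop h).2 ∧ h.Perm ((heappop h).1 :: (heappop h).2) := by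
  cases h with
  | nil => exact absurd rfl hne
  | cons x t =>
    by_cases ht : t = []
    · subst ht
      rw [show heappop [x] = (x, []) from rfl]
      exact ⟨rfl, fun c hc0 hclen => by simp at hclen, List.Perm.refl _⟩
    · obtain ⟨m, hm⟩ : ∃ m, t.length = m + 1 :=
        ⟨t.length - 1, by cases t with | nil => exact absurd rfl ht | cons a s => simp⟩
      have hlen1 : (x :: t).length - 1 = t.length := by simp
      have htake : (x :: t).take ((x :: t).length - 1) = x :: t.dropLast := by
        rw [hlen1, hm, List.take_succ_cons]
        congr 1
        rw [List.dropLast_eq_take, hm]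
        norm_num
      have hrest_ne : ¬ (x :: t).take ((x :: t).length - 1) = [] := by rw [htake]; simp
      have hpop : heappop (x :: t)
          = (hget ((x :: t).take ((x :: t).length - 1)) 0,
             siftdown (siftupDescend (((x :: t).take ((x :: t).length - 1)).set 0
                 (hget (x :: t) ((x :: t).length - 1))) 0).1
               (hget (x :: t) ((x :: t).length - 1))
               (siftupDescend (((x :: t).take ((x :: t).length - 1)).set 0
                 (hget (x :: t) ((x :: t).length - 1))) 0).2) := by
        rw [heappop]
        rw [if_neg hrest_ne]
      rw [hpop, htake, hlen1]
      have hset0 : (x :: t.dropLast).set 0 (hget (x :: t) t.length)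
          = hget (x :: t) t.length :: t.dropLast := rfl
      rw [hset0]
      have hlast : hget (x :: t) t.length = hget t m := by
        rw [hm]; simp [hget]
      have hlen0 : (hget (x :: t) t.length :: t.dropLast).length = m + 1 := by
        simp [List.length_dropLast, hm]
      have hval : ∀ i, 0 < i → i < m + 1 →
          hget (hget (x :: t) t.length :: t.dropLast) i = hget (x :: t) i := by
        intro i hi0 hi
        obtain ⟨j, rfl⟩ : ∃ j, i = j + 1 := ⟨i - 1, by omega⟩
        have h1 : hget (hget (x :: t) t.length :: t.dropLast) (j + 1) = hget t.dropLast j := by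
          simp [hget]
        have h2 : hget (x :: t) (j + 1) = hget t j := by simp [hget]
        rw [h1, h2, hget_eq t.dropLast j (by simp [List.length_dropLast]; omega),
          hget_eq t j (by omega), List.getElem_dropLast]
      have hQa : ∀ c, 0 < c → c < (hget (x :: t) t.length :: t.dropLast).length → c ≠ 0 →
          (c - 1) / 2 ≠ 0 →
          hget (hget (x :: t) t.length :: t.dropLast) ((c - 1) / 2)
            ≤ hget (hget (x :: t) t.length :: t.dropLast) c := by
        intro c hc0 hclen _ hcp
        rw [hlen0] at hclen
        have hple : (c - 1) / 2 ≤ c - 1 := Nat.div_le_self _ _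
        rw [hval c hc0 hclen, hval _ (by omega) (by omega)]
        exact hh c hc0 (by simp; omega)
      obtain ⟨L1, Hp, Hleaf, HQa, HPerm⟩ :=
        descend_spec (m + 1) (hget (x :: t) t.length :: t.dropLast) 0 (by rw [hlen0]; omega)
          (by rw [hlen0]; omega) hQa
          (fun c hc0 hclen hcp hpos => absurd hpos (lt_irrefl 0))
      obtain ⟨S1, S2⟩ := siftdown_spec (hget (x :: t) t.length) _ _ (by rw [L1]; exact Hp)
        (by rw [L1]; exact HQa)
        (by rw [L1]; intro c hc0 hclen hcp; omega)
        (by rw [L1]; intro c hc0 hclen hcp _; omega)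
      refine ⟨rfl, S1, ?_⟩
      have hfinal : (siftdown (siftupDescend (hget (x :: t) t.length :: t.dropLast) 0).1
          (hget (x :: t) t.length)
          (siftupDescend (hget (x :: t) t.length :: t.dropLast) 0).2).Perm
          (hget (x :: t) t.length :: t.dropLast) := by
        refine S2.trans ?_
        have := HPerm (hget (x :: t) t.length)
        simpa using this
      have htperm : t.Perm (hget (x :: t) t.length :: t.dropLast) := by
        conv_lhs => rw [← List.dropLast_append_getLast ht]
        have hgl : hget t m = t.getLast ht := by
          rw [hget_eq t m (by omega), List.getLast_eq_getElem]; congr 1; omega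
        rw [← hgl, ← hlast]
        exact List.perm_append_comm
      have hx0 : hget (x :: t.dropLast) 0 = x := by simp [hget]
      rw [hx0]
      exact (htperm.trans hfinal.symm).cons x

theorem pushfold : ∀ (l pq : List Int), isHeap pq →
    isHeap (l.foldl heappush pq) ∧ (l.foldl heappush pq).Perm (pq ++ l) := by
  intro l
  induction l with
  | nil =>
    intro pq hpq
    rw [List.foldl_nil, List.append_nil]
    exact ⟨hpq, List.Perm.refl _⟩
  | cons y l IH =>
    intro pq hpq
    rw [List.foldl_cons]
    obtain ⟨hh1, hp1⟩ := heappush_spec pq y hpq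
    obtain ⟨H1, H2⟩ := IH (heappush pq y) hh1
    exact ⟨H1, H2.trans ((hp1.append_right l).trans List.perm_middle.symm)⟩

theorem sorted_pop (pq : List Int) (hh : isHeap pq) (hne : pq ≠ []) :
    PySem.List.sorted pq (fun x => x) false
      = (heappop pq).1 :: PySem.List.sorted (heappop pq).2 (fun x => x) false := by
  obtain ⟨hv, hh2, hp⟩ := heappop_spec pq hh hne
  have hperm : ((heappop pq).1 :: PySem.List.sorted (heappop pq).2 (fun x => x) false).Perm pq :=
    ((PySem.List.sorted_perm (heappop pq).2 (fun x => x) false).cons (heappop pq).1).trans hp.symm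
  have hpair : ((heappop pq).1 :: PySem.List.sorted (heappop pq).2 (fun x => x) false).Pairwise
      (· ≤ ·) := by
    rw [List.pairwise_cons]
    refine ⟨?_, ?_⟩
    · intro y hy
      have hy1 : y ∈ (heappop pq).2 := by
        have := PySem.List.mem_sorted (xs := (heappop pq).2) (key := fun x => x)
          (rev := false) (x := y)
        exact this.mp hy
      have hy2 : y ∈ pq := hp.symm.subset (List.mem_cons_of_mem _ hy1)
      obtain ⟨i, hi, rfl⟩ := List.mem_iff_getElem.mp hy2
      rw [hv, ← hget_eq pq i hi]
      exact root_min pq hh i hi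
    · simpa using PySem.List.sorted_pairwise (xs := (heappop pq).2) (key := fun x => x)
  exact PySem.List.sorted_id_eq_of_perm_of_pairwise _ _ hperm hpair

-- write the list s into a1 at consecutive positions starting at j
def writeFrom (a1 : List Int) (j : Nat) : List Int → List Int
  | [] => a1
  | v :: vs => writeFrom (a1.set j v) (j + 1) vs

theorem popfold : ∀ (s : Nat) (pq : List Int), pq.length = s → isHeap pq →
    ∀ (j : Nat) (a1 : List Int),
    (((List.range' j s).map (fun (m : Nat) => (m : Int))).foldl
       (fun (st : List Int × List Int) i =>
         (PySem.List.pySetD st.1 i (heappop st.2).1, (heappop st.2).2)) (a1, pq)).1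
    = writeFrom a1 j (PySem.List.sorted pq (fun x => x) false) := by
  intro s
  induction s with
  | zero =>
    intro pq hlen _ j a1
    have hpq : pq = [] := List.length_eq_zero_iff.mp hlen
    subst hpq
    simp [writeFrom, PySem.List.sorted]
  | succ s IH =>
    intro pq hlen hh j a1
    have hne : pq ≠ [] := by intro h; rw [h] at hlen; simp at hlen
    obtain ⟨hv, hh2, hp⟩ := heappop_spec pq hh hne
    have hlen2 : (heappop pq).2.length = s := by
      have := hp.length_eq; simp at this; omega
    rw [List.range'_succ, List.map_cons, List.foldl_cons, sorted_pop pq hh hne]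
    rw [show writeFrom a1 j ((heappop pq).1 :: PySem.List.sorted (heappop pq).2 (fun x => x) false)
        = writeFrom (a1.set j (heappop pq).1) (j + 1)
            (PySem.List.sorted (heappop pq).2 (fun x => x) false) from rfl]
    rw [← IH (heappop pq).2 hlen2 hh2 (j + 1) (a1.set j (heappop pq).1)]
    congr 1
    rw [PySem.List.pySetD_natCast]

theorem enumfold : ∀ (s : List Int) (j : Nat) (a1 : List Int),
    (PySem.List.enumerate s (j : Int)).foldl
       (fun a1 (iv : Int × Int) => PySem.List.pySetD a1 iv.1 iv.2) a1 = writeFrom a1 j s := by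
  intro s
  induction s with
  | nil => intro j a1; simp [writeFrom, PySem.List.enumerate_nil]
  | cons v vs IH =>
    intro j a1
    rw [PySem.List.enumerate_cons, List.foldl_cons]
    have hc : ((j : Int) + 1) = ((j + 1 : Nat) : Int) := by push_cast; ring
    rw [hc, IH (j + 1) (PySem.List.pySetD a1 (j : Int) v)]
    rw [show writeFrom a1 j (v :: vs) = writeFrom (a1.set j v) (j + 1) vs from rfl]
    congr 1
    rw [PySem.List.pySetD_natCast]

theorem range_getD_take (a : List Int) (m : Nat) (hm : m ≤ a.length) :
    (List.range m).map (fun k => a.getD k 0) = a.take m := by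
  apply List.ext_getElem
  · simp [List.length_take]; omega
  · intro i h1 h2
    simp only [List.getElem_map, List.getElem_range, List.getElem_take]
    rw [List.getD_eq_getElem]

-- ===== VERDICT (by name: the statement is the Claim_ definition above) =====
theorem nearlySorted_spec : Claim_equal_nearlySorted := by
  intro a n k hdom hpre
  unfold Spec_nearlySorted nearlySorted nearlySorted_alt
  by_cases hn : n = 0
  · rw [if_pos hn, if_pos hn]
  · rw [if_neg hn, if_neg hn]
    have hm : n.toNat ≤ a.length := by
      unfold Pre_nearlySorted at hpre; omega
    have hr : PySem.List.pyRange 0 n 1 = (List.range n.toNat).map (fun (j : Nat) => (j : Int)) := by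
      rw [PySem.List.pyRange_one]
      simp
    rw [hr]
    have hpg : (fun (j : Nat) => PySem.List.pyGetD a (j : Int) 0) = fun j => a.getD j 0 := by
      funext j; rw [PySem.List.pyGetD_natCast]
    have hpq : ((List.range n.toNat).map (fun (j : Nat) => (j : Int))).foldl
        (fun pq i => heappush pq (PySem.List.pyGetD a i 0)) []
        = (a.take n.toNat).foldl heappush [] := by
      rw [List.foldl_map, ← range_getD_take a n.toNat hm, List.foldl_map]
      simp only [PySem.List.pyGetD_natCast]
    obtain ⟨hheap, hperm⟩ := pushfold (a.take n.toNat) []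
      (fun c hc0 hclen => by simp at hclen)
    have hperm' : ((a.take n.toNat).foldl heappush []).Perm (a.take n.toNat) := by
      simpa using hperm
    have hlenpq : ((a.take n.toNat).foldl heappush []).length = n.toNat := by
      rw [hperm'.length_eq, List.length_take]; omega
    have hA : (((List.range n.toNat).map (fun (j : Nat) => (j : Int))).foldl
        (fun (st : List Int × List Int) i =>
          (PySem.List.pySetD st.1 i (heappop st.2).1, (heappop st.2).2))
        (a, (a.take n.toNat).foldl heappush [])).1
        = writeFrom a 0 (PySem.List.sorted ((a.take n.toNat).foldl heappush []) (fun x => x) false) := by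
      rw [List.range_eq_range']
      exact popfold n.toNat _ hlenpq hheap 0 a
    have hB : ((List.range n.toNat).map (fun (j : Nat) => (j : Int))).map
        (fun i => PySem.List.pyGetD a i 0) = a.take n.toNat := by
      rw [List.map_map]
      rw [show ((fun i => PySem.List.pyGetD a i 0) ∘ fun (j : Nat) => (j : Int))
          = fun (j : Nat) => PySem.List.pyGetD a (j : Int) 0 from rfl]
      rw [hpg]
      exact range_getD_take a n.toNat hm
    rw [hpq, hA, hB]
    have hsorted : PySem.List.sorted ((a.take n.toNat).foldl heappush []) (fun x => x) false
        = PySem.List.sorted (a.take n.toNat) (fun x => x) false :=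
      (PySem.List.sorted_id_eq_sorted_id_iff_perm _ _).mpr hperm'
    rw [hsorted]
    have hE := enumfold (PySem.List.sorted (a.take n.toNat) (fun x => x) false) 0 a
    rw [show ((0 : Nat) : Int) = (0 : Int) from rfl] at hE
    rw [hE]
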